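-- pv_equiv track=rewrite | github.com/notesby/CARDALG | Method 8/ganuggets2.py | getExpr
-- ===== SOURCE A (Python) =====
-- def getExpr(size):
--     val = ""
--     lst = []
--     if len(size) > 1:
--         for i in range(1,len(size)):
--             temp = "xi[{}]".format(i-1)
--             for j in range(i,len(size)):
--                 temp += "*{}".format(size[j])
--             lst.append(temp)
--     else:
--         i = 0
--     val += "+".join(lst)
--     val += "+xi[{}]".format(i)
--     return val
-- ===== SOURCE B (Python) =====
-- def getExpr(size):
--     n = len(size)
--     terms = []
--     suffix = ""
--     for i in range(n - 1, 0, -1):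
--         suffix = "*{}".format(size[i]) + suffix
--         terms.insert(0, "xi[{}]".format(i - 1) + suffix)
--     return "+".join(terms) + "+xi[{}]".format(max(n - 1, 0))
-- ===== Notes on version B (the rewrite author's own statement) =====
-- stated objective: faster
-- what changed: Replaces the nested double loop (each term rebuilds its product suffix from scratch, quadratically many formatted pieces) with one right-to-left pass that maintains a single accumulated suffix string, and computes the terminal index by the closed form max(len(size)-1, 0).
import Mathlib
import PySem

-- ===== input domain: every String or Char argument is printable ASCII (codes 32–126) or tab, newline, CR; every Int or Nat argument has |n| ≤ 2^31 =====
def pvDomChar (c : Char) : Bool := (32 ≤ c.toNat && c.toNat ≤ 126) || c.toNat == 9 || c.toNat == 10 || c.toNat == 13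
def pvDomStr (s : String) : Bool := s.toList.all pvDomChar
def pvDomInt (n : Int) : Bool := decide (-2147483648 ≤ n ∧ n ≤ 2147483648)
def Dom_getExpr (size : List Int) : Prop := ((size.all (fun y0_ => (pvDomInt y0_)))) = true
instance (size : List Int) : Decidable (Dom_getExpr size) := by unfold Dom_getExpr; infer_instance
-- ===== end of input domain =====

-- B replaces A's nested double loop (each term recomputes its suffix product string from scratch)
-- with one right-to-left pass that maintains a single accumulated suffix string (alternative decomposition).


-- ===== PORT A =====
-- transliteration of A: nested loops over ranges; the leftover loop variable i and lst are the pair state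
def getExpr (size : List Int) : String :=
  let val : String := ""
  let st : List String × Int :=
    if size.length > 1 then
      (PySem.List.pyRange 1 (size.length : Int) 1).foldl
        (fun (st : List String × Int) i =>
          let temp : String := "xi[" ++ PySem.Int.toStr (i - 1) ++ "]"
          let temp : String :=
            (PySem.List.pyRange i (size.length : Int) 1).foldl
              (fun t j => t ++ "*" ++ PySem.Int.toStr (PySem.List.pyGetD size j 0)) temp
          (st.1 ++ [temp], i))
        ([], 0)
    else
      ([], 0)
  let val := val ++ PySem.Str.join "+" st.1
  let val := val ++ ("+xi[" ++ PySem.Int.toStr st.2 ++ "]")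
  val

-- ===== PORT B =====
-- transliteration of B: one descending pass, state = (terms list, accumulated suffix string)
def getExpr_alt (size : List Int) : String :=
  let n : Int := size.length
  let st : List String × String :=
    (PySem.List.pyRange (n - 1) 0 (-1)).foldl
      (fun (st : List String × String) i =>
        let suffix : String := "*" ++ PySem.Int.toStr (PySem.List.pyGetD size i 0) ++ st.2
        (("xi[" ++ PySem.Int.toStr (i - 1) ++ "]" ++ suffix) :: st.1, suffix))
      ([], "")
  PySem.Str.join "+" st.1 ++ ("+xi[" ++ PySem.Int.toStr (max (n - 1) 0) ++ "]")

-- ===== PRECONDITION & SPEC =====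
def Spec_getExpr (size : List Int) (out : String) : Prop := out = getExpr_alt size
instance (size : List Int) (out : String) : Decidable (Spec_getExpr size out) := by unfold Spec_getExpr; infer_instance

-- ===== CLAIM (what is proved, stated in full; the proofs are below) =====
def Claim_equal_getExpr : Prop := ∀ (size : List Int), Dom_getExpr size → Spec_getExpr size (getExpr size)

-- ===== LEMMAS AND PROOFS =====

-- the product-suffix string of a tail of size
def sufS (l : List Int) : String :=
  l.foldr (fun x r => "*" ++ PySem.Int.toStr x ++ r) ""

-- the i-th term, i a 1-based Int index into size
def termS (size : List Int) (i : Int) : String :=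
  "xi[" ++ PySem.Int.toStr (i - 1) ++ "]" ++ sufS (size.drop i.toNat)

-- appending "*"+str(x) in a left fold builds init ++ sufS l
theorem foldl_star_eq (l : List Int) (init : String) :
    l.foldl (fun t x => t ++ "*" ++ PySem.Int.toStr x) init = init ++ sufS l := by
  induction l generalizing init with
  | nil => simp [sufS, String.append_empty]
  | cons x tl ih =>
      simp only [List.foldl_cons, ih, sufS, List.foldr_cons]
      simp [String.append_assoc]

-- A's inner loop is the suffix string
theorem inner_eq (size : List Int) (a : Int) (h0 : 0 ≤ a) (init : String) :
    (PySem.List.pyRange a (size.length : Int) 1).foldl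
      (fun t j => t ++ "*" ++ PySem.Int.toStr (PySem.List.pyGetD size j 0)) init
    = init ++ sufS (size.drop a.toNat) := by
  rw [PySem.List.foldl_pyRange_pyGetD' size 0
        (fun t x => t ++ "*" ++ PySem.Int.toStr x) init h0]
  exact foldl_star_eq (size.drop a.toNat) init

-- a fold that only records the loop variable returns the last element
theorem foldl_last {α : Type} (l : List α) (a : α) :
    l.foldl (fun _ x => x) a = l.getLastD a := by
  induction l generalizing a with
  | nil => rfl
  | cons x tl ih =>
      simp only [List.foldl_cons, ih]
      cases tl with
      | nil => rfl
      | cons y tl' => simp [List.getLastD]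

-- B's loop invariant
theorem bloop (size : List Int) (a : Nat) (h : a + 1 ≤ size.length) (t0 : List String) :
    (PySem.List.pyRange (a : Int) 0 (-1)).foldl
      (fun (st : List String × String) i =>
        let suffix : String := "*" ++ PySem.Int.toStr (PySem.List.pyGetD size i 0) ++ st.2
        (("xi[" ++ PySem.Int.toStr (i - 1) ++ "]" ++ suffix) :: st.1, suffix))
      (t0, sufS (size.drop (a + 1)))
    = ((PySem.List.pyRange 1 ((a : Int) + 1) 1).map (termS size) ++ t0, sufS (size.drop 1)) := by
  induction a generalizing t0 with
  | zero =>
      rw [PySem.List.pyRange_neg_one_eq_nil (by omega), PySem.List.pyRange_one_eq_nil (by omega)]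
      simp
  | succ k ih =>
      rw [PySem.List.pyRange_neg_one_cons (by exact_mod_cast Nat.succ_pos k)]
      have hcast : ((k + 1 : Nat) : Int) - 1 = (k : Int) := by push_cast; ring
      have hk1 : k + 1 < size.length := by omega
      have hsuf : ("*" ++ PySem.Int.toStr (PySem.List.pyGetD size ((k + 1 : Nat) : Int) 0)
            ++ sufS (size.drop (k + 1 + 1))) = sufS (size.drop (k + 1)) := by
        rw [PySem.List.pyGetD_natCast, List.getD_eq_getElem _ _ hk1,
            List.drop_eq_getElem_cons hk1]
        rfl
      simp only [List.foldl_cons, hcast]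
      rw [hsuf]
      have hterm : ("xi[" ++ PySem.Int.toStr ((k : Nat) : Int) ++ "]"
            ++ sufS (size.drop (k + 1))) = termS size ((k + 1 : Nat) : Int) := by
        simp [termS]
      rw [hterm, ih (by omega) (termS size ((k + 1 : Nat) : Int) :: t0)]
      rw [show PySem.List.pyRange 1 (((k + 1 : Nat) : Int) + 1) 1
            = PySem.List.pyRange 1 ((k : Int) + 1) 1 ++ [(k : Int) + 1] from by
          rw [show ((k + 1 : Nat) : Int) + 1 = ((k : Int) + 1) + 1 by push_cast; ring]
          exact PySem.List.pyRange_one_succ_right (by omega)]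
      simp [List.map_append]

-- ===== VERDICT (by name: the statement is the Claim_ definition above) =====
theorem getExpr_spec : Claim_equal_getExpr := by
  intro size _
  unfold Spec_getExpr getExpr getExpr_alt
  simp only []
  by_cases hn : size.length > 1
  · -- n ≥ 2: both sides are join of the mapped terms plus the terminal xi[n-1]
    rw [if_pos hn]
    rw [PySem.List.foldl_prod_mk
          (f := fun (l : List String) (i : Int) =>
            l ++ [(PySem.List.pyRange i (size.length : Int) 1).foldl
              (fun t j => t ++ "*" ++ PySem.Int.toStr (PySem.List.pyGetD size j 0))
              ("xi[" ++ PySem.Int.toStr (i - 1) ++ "]")])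
          (g := fun (_ : Int) (i : Int) => i)]
    rw [PySem.List.foldl_append_singleton_eq_map, foldl_last]
    -- the leftover loop variable is the last range element, n-1
    have hlast : (PySem.List.pyRange 1 (size.length : Int) 1).getLastD 0
        = (size.length : Int) - 1 := by
      rw [show ((size.length : Int)) = ((size.length : Int) - 1) + 1 by ring,
          PySem.List.pyRange_one_succ_right (by omega)]
      simp
    -- A's mapped terms are termS
    have hmap : (PySem.List.pyRange 1 (size.length : Int) 1).map
          (fun i => (PySem.List.pyRange i (size.length : Int) 1).foldl
            (fun t j => t ++ "*" ++ PySem.Int.toStr (PySem.List.pyGetD size j 0))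
            ("xi[" ++ PySem.Int.toStr (i - 1) ++ "]"))
        = (PySem.List.pyRange 1 (size.length : Int) 1).map (termS size) := by
      apply List.map_congr_left
      intro i hi
      rw [PySem.List.mem_pyRange_one] at hi
      rw [inner_eq size i (by omega)]
      rfl
    -- B's loop via the invariant
    have hb := bloop size (size.length - 1) (by omega) []
    rw [show ((size.length - 1 : Nat) : Int) = (size.length : Int) - 1 by omega] at hb
    rw [show size.length - 1 + 1 = size.length by omega, List.drop_length] at hb
    rw [show (((size.length : Int) - 1) + 1) = (size.length : Int) by ring] at hb
    rw [show sufS [] = "" from rfl] at hb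
    rw [hb, hlast, hmap]
    rw [show max ((size.length : Int) - 1) 0 = (size.length : Int) - 1 by omega]
    simp [String.empty_append]
  · -- n ≤ 1: both sides are "" joined with the terminal xi[0]
    rw [if_neg hn]
    rw [PySem.List.pyRange_neg_one_eq_nil (by omega)]
    simp [String.empty_append]
    rw [show max ((size.length : Int) - 1) 0 = 0 by omega]
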